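-- pv_equiv track=rewrite | github.com/Yifeng-se/advent_of_code_2017 | day09.py | cleanGarbage
-- ===== SOURCE A (Python) =====
-- def cleanGarbage(s):
-- 	bInGarbage, passNext = False, False
-- 	r, total_garbage = '', ''
-- 	for x in s:
-- 		if bInGarbage:
-- 			if passNext:
-- 				passNext = False
-- 				continue
-- 			if x == '!':
-- 				passNext = True
-- 				continue
-- 			else:
-- 				passNext = False
-- 				if x != '>':
-- 					total_garbage += x
-- 			if x == '>':
-- 				bInGarbage = False
-- 				continue
-- 			continue
-- 		else:
-- 			if x == '<':
-- 				bInGarbage = True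
-- 				continue
-- 			else:
-- 				r += x
-- 	return r, total_garbage
-- ===== SOURCE B (Python) =====
-- def cleanGarbage(s):
--     # chunked parser: jump between delimiters with str.find and copy whole slices
--     r_parts, g_parts = [], []
--     i = 0
--     while True:
--         j = s.find('<', i)
--         if j == -1:
--             r_parts.append(s[i:])
--             break
--         r_parts.append(s[i:j])
--         i = j + 1
--         while True:
--             e = s.find('!', i)
--             c = s.find('>', i)
--             if e != -1 and (c == -1 or e < c):
--                 g_parts.append(s[i:e])
--                 i = e + 2
--             elif c != -1:
--                 g_parts.append(s[i:c])
--                 i = c + 1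
--                 break
--             else:
--                 g_parts.append(s[i:])
--                 i = len(s)
--                 break
--     return ''.join(r_parts), ''.join(g_parts)
-- ===== Notes on version B (the rewrite author's own statement) =====
-- stated objective: faster
-- what changed: Replaced the per-character boolean state machine with a chunked parser that uses str.find to locate the next delimiter ('<' outside garbage, '!' vs '>' inside) and appends whole slices between delimiters, so no per-character Python-level branching or passNext flag remains.
import Mathlib
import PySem

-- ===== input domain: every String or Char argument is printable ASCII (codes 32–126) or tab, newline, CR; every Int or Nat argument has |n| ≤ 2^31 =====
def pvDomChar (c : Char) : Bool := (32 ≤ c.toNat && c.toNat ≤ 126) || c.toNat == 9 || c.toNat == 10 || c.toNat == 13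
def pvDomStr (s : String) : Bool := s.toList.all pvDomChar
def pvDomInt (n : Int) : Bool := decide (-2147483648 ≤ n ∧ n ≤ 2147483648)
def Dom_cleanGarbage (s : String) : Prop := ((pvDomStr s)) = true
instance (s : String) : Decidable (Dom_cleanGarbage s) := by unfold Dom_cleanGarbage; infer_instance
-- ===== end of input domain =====

-- B replaces the per-character boolean state machine with a chunked parser that jumps to the
-- next delimiter with find and copies whole slices (measured constant-factor speedup in Python).

-- ===== PORT A =====
-- state = (bInGarbage, passNext, r, total_garbage); one fold step per character, branches in A's order
def stepA (st : Bool × Bool × List Char × List Char) (x : Char) : Bool × Bool × List Char × List Char :=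
  match st with
  | (bInGarbage, passNext, r, tg) =>
    if bInGarbage then
      if passNext then (bInGarbage, false, r, tg)
      else if x = '!' then (bInGarbage, true, r, tg)
      else
        -- passNext = False; if x != '>' collect; if x == '>' leave garbage
        if x = '>' then (false, false, r, tg)
        else (bInGarbage, false, r, tg ++ [x])
    else
      if x = '<' then (true, passNext, r, tg)
      else (bInGarbage, passNext, r ++ [x], tg)

def cleanGarbage (s : String) : String × String :=
  let st := s.toList.foldl stepA (false, false, [], [])
  (String.ofList st.2.2.1, String.ofList st.2.2.2)

-- ===== PORT B =====
-- s.find(ch, i) restricted to the remaining suffix: index of the first occurrence, none = -1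
def pvFind (ch : Char) (t : List Char) : Option Nat := t.findIdx? (· == ch)

-- inner while loop of Source B over the garbage region: e = find('!'), c = find('>'),
-- copy the slice up to the nearer delimiter; returns (garbage so far, rest after '>').
-- fuel is a pure totality guard: each iteration strictly shortens the suffix, so
-- fuel = length + 1 always suffices and the fuel-0 branch is never reached.
def pgo (fuel : Nat) (t g : List Char) : List Char × List Char :=
  match fuel with
  | 0 => (g, [])
  | fuel + 1 =>
    match pvFind '!' t, pvFind '>' t with
    | some e, none => pgo fuel (t.drop (e + 2)) (g ++ t.take e)
    | some e, some c =>
        if e < c then pgo fuel (t.drop (e + 2)) (g ++ t.take e)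
        else (g ++ t.take c, t.drop (c + 1))
    | none, some c => (g ++ t.take c, t.drop (c + 1))
    | none, none => (g ++ t, [])

-- outer while loop of Source B: copy the slice up to the next '<', then parse a garbage region
def pno (fuel : Nat) (t r g : List Char) : List Char × List Char :=
  match fuel with
  | 0 => (r, g)
  | fuel + 1 =>
    match pvFind '<' t with
    | none => (r ++ t, g)
    | some j =>
        let p := pgo ((t.drop (j + 1)).length + 1) (t.drop (j + 1)) g
        pno fuel p.2 (r ++ t.take j) p.1

def cleanGarbage_alt (s : String) : String × String :=
  let p := pno (s.toList.length + 1) s.toList [] []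
  (String.ofList p.1, String.ofList p.2)

-- ===== PRECONDITION & SPEC =====
def Spec_cleanGarbage (s : String) (out : String × String) : Prop := out = cleanGarbage_alt s
instance (s : String) (out : String × String) : Decidable (Spec_cleanGarbage s out) := by unfold Spec_cleanGarbage; infer_instance

-- ===== CLAIM =====
def Claim_equal_cleanGarbage : Prop := ∀ (s : String), Dom_cleanGarbage s → Spec_cleanGarbage s (cleanGarbage s)

-- ===== LEMMAS AND PROOFS =====
-- the index found is in range
theorem pvFind_lt {ch : Char} {t : List Char} {e : Nat} (h : pvFind ch t = some e) :
    e < t.length := (List.findIdx?_eq_some_iff_findIdx_eq.mp h).1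

-- how find behaves on a cons
lemma pvFind_cons_ne {ch x : Char} (t : List Char) (h : x ≠ ch) :
    pvFind ch (x :: t) = (pvFind ch t).map (· + 1) := by
  simp [pvFind, List.findIdx?_cons, beq_iff_eq, h]

lemma pvFind_cons_eq (ch : Char) (t : List Char) :
    pvFind ch (ch :: t) = some 0 := by
  simp [pvFind, List.findIdx?_cons]

-- proof-side bridge: the per-character two-region scan (B's chunks coarsen it; A's fold refines it)
def goB (fuel : Nat) (inGarbage : Bool) (l : List Char) (r tg : List Char) : List Char × List Char :=
  match fuel with
  | 0 => (r, tg)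
  | fuel + 1 =>
    match inGarbage, l with
    | _, [] => (r, tg)
    | true, x :: t =>
      if x = '!' then goB fuel true t.tail r tg
      else if x = '>' then goB fuel false t r tg
      else goB fuel true t r (tg ++ [x])
    | false, x :: t =>
      if x = '<' then goB fuel true t r tg
      else goB fuel false t (r ++ [x]) tg

-- A's fold from either stable state (passNext = false) agrees with the two-region scan
lemma foldA_eq_goB : ∀ (f : Nat) (l : List Char), l.length ≤ f → ∀ (r tg : List Char),
    (l.foldl stepA (false, false, r, tg)).2.2 = goB f false l r tg ∧
    (l.foldl stepA (true, false, r, tg)).2.2 = goB f true l r tg := by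
  intro f
  induction f with
  | zero =>
    intro l hl r tg
    have : l = [] := List.eq_nil_of_length_eq_zero (Nat.le_zero.mp hl)
    subst this; simp [goB]
  | succ f ih =>
    intro l hl r tg
    match l with
    | [] => simp [goB]
    | x :: t =>
      simp only [List.length_cons, Nat.succ_le_succ_iff] at hl
      constructor
      · by_cases hx : x = '<'
        · simp [List.foldl_cons, stepA, hx, goB, (ih t hl r tg).2]
        · simp [List.foldl_cons, stepA, hx, goB, (ih t hl (r ++ [x]) tg).1]
      · by_cases hb : x = '!'
        · simp only [List.foldl_cons, stepA, hb, if_pos]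
          match t with
          | [] =>
            simp only [List.foldl_nil, goB]
            match f with
            | 0 => rfl
            | f + 1 => simp [goB]
          | y :: t' =>
            have ht' : t'.length ≤ f := by simp at hl; omega
            have h2 := (ih t' (by omega) r tg).2
            simp [List.foldl_cons, stepA, goB, h2]
        · by_cases hg : x = '>'
          · simp [List.foldl_cons, stepA, hg, goB, (ih t hl r tg).1]
          · simp [List.foldl_cons, stepA, hb, hg, goB, (ih t hl r (tg ++ [x])).2]

-- equation lemmas for the chunk parsers, one per find outcome
lemma pgo_nn {t g : List Char} {f : Nat} (he : pvFind '!' t = none) (hc : pvFind '>' t = none) :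
    pgo (f + 1) t g = (g ++ t, []) := by simp [pgo, he, hc]

lemma pgo_sn {t g : List Char} {f e : Nat} (he : pvFind '!' t = some e) (hc : pvFind '>' t = none) :
    pgo (f + 1) t g = pgo f (t.drop (e + 2)) (g ++ t.take e) := by simp [pgo, he, hc]

lemma pgo_ns {t g : List Char} {f c : Nat} (he : pvFind '!' t = none) (hc : pvFind '>' t = some c) :
    pgo (f + 1) t g = (g ++ t.take c, t.drop (c + 1)) := by simp [pgo, he, hc]

lemma pgo_ss {t g : List Char} {f e c : Nat} (he : pvFind '!' t = some e) (hc : pvFind '>' t = some c) :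
    pgo (f + 1) t g = if e < c then pgo f (t.drop (e + 2)) (g ++ t.take e)
              else (g ++ t.take c, t.drop (c + 1)) := by simp [pgo, he, hc]

lemma pno_n {t r g : List Char} {f : Nat} (hj : pvFind '<' t = none) :
    pno (f + 1) t r g = (r ++ t, g) := by simp [pno, hj]

lemma pno_s {t r g : List Char} {f j : Nat} (hj : pvFind '<' t = some j) :
    pno (f + 1) t r g = pno f (pgo ((t.drop (j + 1)).length + 1) (t.drop (j + 1)) g).2
      (r ++ t.take j) (pgo ((t.drop (j + 1)).length + 1) (t.drop (j + 1)) g).1 := by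
  simp [pno, hj]

-- the rest returned by pgo is no longer than its input
lemma pgo_rest_le : ∀ (f : Nat) (t g : List Char), (pgo f t g).2.length ≤ t.length := by
  intro f
  induction f with
  | zero => intro t g; simp [pgo]
  | succ f ih =>
    intro t g
    rcases he : pvFind '!' t with _ | e <;> rcases hc : pvFind '>' t with _ | c
    · rw [pgo_nn he hc]; simp
    · rw [pgo_ns he hc]; simp
    · rw [pgo_sn he hc]
      have := ih (t.drop (e + 2)) (g ++ t.take e)
      simp only [List.length_drop] at this; omega
    · rw [pgo_ss he hc]
      split
      · have := ih (t.drop (e + 2)) (g ++ t.take e)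
        simp only [List.length_drop] at this; omega
      · simp

-- enough fuel: the result does not depend on the exact fuel value
lemma pgo_irrel : ∀ (f1 : Nat) (t g : List Char) (f2 : Nat),
    t.length < f1 → t.length < f2 → pgo f1 t g = pgo f2 t g := by
  intro f1
  induction f1 with
  | zero => intro t g f2 h1 _; omega
  | succ f1 ih =>
    intro t g f2 h1 h2
    match f2, h2 with
    | f2 + 1, h2 =>
      rcases he : pvFind '!' t with _ | e <;> rcases hc : pvFind '>' t with _ | c
      · rw [pgo_nn he hc, pgo_nn he hc]
      · rw [pgo_ns he hc, pgo_ns he hc]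
      · rw [pgo_sn he hc, pgo_sn he hc]
        have hlt := pvFind_lt he
        exact ih _ _ _ (by simp [List.length_drop]; omega) (by simp [List.length_drop]; omega)
      · rw [pgo_ss he hc, pgo_ss he hc]
        split
        · have hlt := pvFind_lt he
          exact ih _ _ _ (by simp [List.length_drop]; omega) (by simp [List.length_drop]; omega)
        · rfl

lemma goB_irrel : ∀ (f1 : Nat) (b : Bool) (t r tg : List Char) (f2 : Nat),
    t.length < f1 → t.length < f2 → goB f1 b t r tg = goB f2 b t r tg := by
  intro f1
  induction f1 with
  | zero => intro b t r tg f2 h1 _; omega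
  | succ f1 ih =>
    intro b t r tg f2 h1 h2
    match f2, h2 with
    | f2 + 1, h2 =>
      match b, t with
      | _, [] => cases b <;> simp [goB]
      | true, x :: t' =>
        simp only [List.length_cons] at h1 h2
        simp only [goB]
        split
        · exact ih _ _ _ _ _ (by simp only [List.length_tail]; omega)
            (by simp only [List.length_tail]; omega)
        · split
          · exact ih _ _ _ _ _ (by omega) (by omega)
          · exact ih _ _ _ _ _ (by omega) (by omega)
      | false, x :: t' =>
        simp only [List.length_cons] at h1 h2
        simp only [goB]
        split
        · exact ih _ _ _ _ _ (by omega) (by omega)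
        · exact ih _ _ _ _ _ (by omega) (by omega)

lemma pno_irrel : ∀ (f1 : Nat) (t r g : List Char) (f2 : Nat),
    t.length < f1 → t.length < f2 → pno f1 t r g = pno f2 t r g := by
  intro f1
  induction f1 with
  | zero => intro t r g f2 h1 _; omega
  | succ f1 ih =>
    intro t r g f2 h1 h2
    match f2, h2 with
    | f2 + 1, h2 =>
      rcases hj : pvFind '<' t with _ | j
      · rw [pno_n hj, pno_n hj]
      · rw [pno_s hj, pno_s hj]
        have hlt := pvFind_lt hj
        have hrest := pgo_rest_le ((t.drop (j + 1)).length + 1) (t.drop (j + 1)) g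
        have hl2 : (t.drop (j + 1)).length + 1 ≤ t.length := by
          simp only [List.length_drop]; omega
        exact ih _ _ _ _ (by omega) (by omega)

-- shifting an ordinary head character into the garbage accumulator
lemma pgo_shift (f : Nat) (x : Char) (t g : List Char) (hb : x ≠ '!') (hg : x ≠ '>') :
    pgo (f + 1) (x :: t) g = pgo (f + 1) t (g ++ [x]) := by
  rcases he : pvFind '!' t with _ | e <;> rcases hc : pvFind '>' t with _ | c
  · rw [pgo_nn (t := x :: t) (by simp [pvFind_cons_ne, hb, he]) (by simp [pvFind_cons_ne, hg, hc]),
       pgo_nn he hc]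
    simp
  · rw [pgo_ns (t := x :: t) (c := c + 1) (by simp [pvFind_cons_ne, hb, he]) (by simp [pvFind_cons_ne, hg, hc]),
       pgo_ns he hc]
    simp
  · rw [pgo_sn (t := x :: t) (e := e + 1) (by simp [pvFind_cons_ne, hb, he]) (by simp [pvFind_cons_ne, hg, hc]),
       pgo_sn he hc]
    simp
  · rw [pgo_ss (t := x :: t) (e := e + 1) (c := c + 1) (by simp [pvFind_cons_ne, hb, he]) (by simp [pvFind_cons_ne, hg, hc]),
       pgo_ss he hc]
    have h2 : (e + 1 < c + 1) ↔ e < c := by omega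
    simp only [h2]
    split <;> simp

-- shifting an ordinary head character into the result accumulator
lemma pno_shift (f : Nat) (x : Char) (t r g : List Char) (hx : x ≠ '<') :
    pno (f + 1) (x :: t) r g = pno (f + 1) t (r ++ [x]) g := by
  rcases hj : pvFind '<' t with _ | j
  · rw [pno_n (t := x :: t) (by simp [pvFind_cons_ne, hx, hj]), pno_n hj]
    simp
  · rw [pno_s (t := x :: t) (j := j + 1) (by simp [pvFind_cons_ne, hx, hj]), pno_s hj]
    simp

-- the garbage chunk parser equals running the per-character scan through the garbage region
lemma pgo_goB : ∀ (f : Nat) (t : List Char), t.length < f → ∀ (r g : List Char),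
    goB f true t r g = goB f false (pgo f t g).2 r (pgo f t g).1 := by
  intro f
  induction f with
  | zero => intro t ht; omega
  | succ f ih =>
    intro t ht r g
    match t with
    | [] =>
      rw [pgo_nn (by simp [pvFind]) (by simp [pvFind])]
      simp [goB]
    | x :: t' =>
      simp only [List.length_cons] at ht
      by_cases hb : x = '!'
      · subst hb
        have he : pvFind '!' ('!' :: t') = some 0 := pvFind_cons_eq _ _
        have hstep : goB (f + 1) true ('!' :: t') r g = goB f true t'.tail r g := by
          simp [goB]
        rw [hstep]
        have htl : t'.tail.length < f := by simp only [List.length_tail]; omega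
        have ihtail := ih t'.tail htl r g
        rcases hc : pvFind '>' t' with _ | c
        · rw [pgo_sn he (by simp [pvFind_cons_ne, hc])]
          simp only [List.drop_succ_cons, List.take_zero, List.append_nil, List.drop_one]
          rw [ihtail]
          have hrest := pgo_rest_le f t'.tail g
          exact goB_irrel f false _ r _ (f + 1) (by omega) (by omega)
        · rw [pgo_ss he (c := c + 1) (by rw [pvFind_cons_ne _ (by decide), hc]; rfl)]
          simp only [Nat.zero_lt_succ, if_pos, List.drop_succ_cons, List.take_zero,
            List.append_nil, List.drop_one]
          rw [ihtail]
          have hrest := pgo_rest_le f t'.tail g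
          exact goB_irrel f false _ r _ (f + 1) (by omega) (by omega)
      · by_cases hg : x = '>'
        · subst hg
          have hc : pvFind '>' ('>' :: t') = some 0 := pvFind_cons_eq _ _
          have hstep : goB (f + 1) true ('>' :: t') r g = goB f false t' r g := by
            simp [goB, hb]
          rw [hstep]
          have hrw : pgo (f + 1) ('>' :: t') g = (g, t') := by
            rcases he : pvFind '!' t' with _ | e
            · rw [pgo_ns (by simp [pvFind_cons_ne, he]) hc]; simp
            · rw [pgo_ss (e := e + 1) (by rw [pvFind_cons_ne _ (by decide), he]; rfl) hc]
              have hno : ¬ (e + 1 < 0) := by omega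
              simp [hno]
          rw [hrw]
          exact goB_irrel f false t' r g (f + 1) (by omega) (by omega)
        · have hstep : goB (f + 1) true (x :: t') r g = goB f true t' r (g ++ [x]) := by
            simp [goB, hb, hg]
          rw [hstep, pgo_shift f x t' g hb hg]
          have ih' := ih t' (by omega) r (g ++ [x])
          rw [ih']
          have hrest := pgo_rest_le f t' (g ++ [x])
          rw [pgo_irrel (f + 1) t' (g ++ [x]) f (by omega) (by omega)]
          have hrest2 := pgo_rest_le f t' (g ++ [x])
          exact goB_irrel f false (pgo f t' (g ++ [x])).2 r (pgo f t' (g ++ [x])).1 (f + 1)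
            (by omega) (by omega)

-- the outer chunk parser equals the per-character scan
lemma pno_goB : ∀ (f : Nat) (t : List Char), t.length < f → ∀ (r g : List Char),
    pno f t r g = goB f false t r g := by
  intro f
  induction f with
  | zero => intro t ht; omega
  | succ f ih =>
    intro t ht r g
    match t with
    | [] => rw [pno_n (by simp [pvFind])]; simp [goB]
    | x :: t' =>
      simp only [List.length_cons] at ht
      by_cases hx : x = '<'
      · subst hx
        rw [pno_s (j := 0) (pvFind_cons_eq _ _)]
        simp only [List.take_zero, List.append_nil, List.drop_succ_cons, List.drop_zero]
        have hrest := pgo_rest_le (t'.length + 1) t' g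
        rw [ih (pgo (t'.length + 1) t' g).2 (by omega) r (pgo (t'.length + 1) t' g).1]
        have hgb : goB (f + 1) false ('<' :: t') r g = goB f true t' r g := by
          simp [goB]
        rw [hgb]
        have hmain := pgo_goB (t'.length + 1) t' (by omega) r g
        have h1 : goB f true t' r g = goB (t'.length + 1) true t' r g :=
          goB_irrel f true t' r g (t'.length + 1) (by omega) (by omega)
        rw [h1, hmain]
        exact (goB_irrel (t'.length + 1) false _ r _ f (by omega) (by omega)).symm
      · rw [pno_shift f x t' r g hx]
        have hgb : goB (f + 1) false (x :: t') r g = goB f false t' (r ++ [x]) g := by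
          simp [goB, hx]
        rw [hgb, pno_irrel (f + 1) t' (r ++ [x]) g f (by omega) (by omega)]
        exact ih t' (by omega) (r ++ [x]) g

-- ===== VERDICT =====
theorem cleanGarbage_spec : Claim_equal_cleanGarbage := by
  intro s _
  unfold Spec_cleanGarbage cleanGarbage cleanGarbage_alt
  have h1 := (foldA_eq_goB (s.toList.length + 1) s.toList (by omega) [] []).1
  have h2 := pno_goB (s.toList.length + 1) s.toList (by omega) [] []
  simp only [h1, h2]
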